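-- pv_equiv track=rewrite | github.com/HisarCS/OpenZekaFolders | MainCodes/LineTracking/yasarLineCodes/main_image.py | sortTheArrayLen
-- ===== SOURCE A (Python) =====
-- def sortTheArrayLen(array):
--     theIndexList = list()
--     for (i, l1) in enumerate(array):
--         theIndexList.append([len(l1), i])
--     theIndexList = sorted(theIndexList, reverse=True)
--
--     theTopThree = list()
--     for t in theIndexList[:3]:
--         indexNumber = t[1]
--         theTopThree.append(array[indexNumber])
--
--     return theTopThree
-- ===== SOURCE B (Python) =====
-- def sortTheArrayLen(array):
--     # Single pass: keep only the top three (length, index) keys, in descending order.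
--     best = []
--     for i, l in enumerate(array):
--         k = (len(l), i)
--         pos = 0
--         while pos < len(best) and best[pos] > k:
--             pos += 1
--         best.insert(pos, k)
--         if len(best) > 3:
--             best.pop()
--     return [array[i] for (_, i) in best]
-- ===== Notes on version B (the rewrite author's own statement) =====
-- stated objective: alternative
-- what changed: Replaces building and fully sorting a [len,index] key list with a single pass that maintains only the current top-three (len,index) keys under the same descending comparison.
import Mathlib
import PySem

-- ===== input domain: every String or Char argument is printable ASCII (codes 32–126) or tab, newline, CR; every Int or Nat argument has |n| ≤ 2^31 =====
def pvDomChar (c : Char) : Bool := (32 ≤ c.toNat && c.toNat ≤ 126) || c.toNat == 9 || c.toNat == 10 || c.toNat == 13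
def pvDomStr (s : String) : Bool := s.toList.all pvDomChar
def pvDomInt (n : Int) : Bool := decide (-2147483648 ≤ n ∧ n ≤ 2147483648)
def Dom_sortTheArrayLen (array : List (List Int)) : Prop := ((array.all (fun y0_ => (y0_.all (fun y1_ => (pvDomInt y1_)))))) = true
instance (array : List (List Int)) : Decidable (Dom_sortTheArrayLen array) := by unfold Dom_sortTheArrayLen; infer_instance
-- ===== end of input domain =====

-- B replaces the full sort of the [len, index] key list by a single pass that keeps only the
-- current top-three (len, index) keys under the same descending comparison (alternative algorithm).

-- ===== PORT A =====
def sortTheArrayLen (array : List (List Int)) : List (List Int) :=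
  let theIndexList : List (List Int) :=
    (PySem.List.enumerate array).foldl
      (fun acc p => acc ++ [[PySem.List.len p.2, p.1]]) []
  let theIndexList := PySem.List.sorted theIndexList (fun x => x) true
  (PySem.List.slice theIndexList none (some 3)).foldl
    (fun acc t => acc ++ [PySem.List.pyGetD array (PySem.List.pyGetD t 1 0) []]) []

-- ===== PORT B =====
-- Python tuple comparison best[pos] > k on (len, index) pairs
def pvGt (a b : Int × Int) : Bool := a.1 > b.1 || (a.1 == b.1 && a.2 > b.2)

-- the position scan `while pos < len(best) and best[pos] > k` followed by `best.insert(pos, k)`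
def pvIns (k : Int × Int) : List (Int × Int) → List (Int × Int)
  | [] => [k]
  | b :: rest => if pvGt b k then b :: pvIns k rest else k :: b :: rest

def sortTheArrayLen_alt (array : List (List Int)) : List (List Int) :=
  let best := (PySem.List.enumerate array).foldl
    (fun best p =>
      let t := pvIns (PySem.List.len p.2, p.1) best
      if t.length > 3 then t.dropLast else t) []
  best.map (fun p => PySem.List.pyGetD array p.2 [])

-- ===== PRECONDITION & SPEC =====
def Spec_sortTheArrayLen (array : List (List Int)) (out : List (List Int)) : Prop := out = sortTheArrayLen_alt array
instance (array : List (List Int)) (out : List (List Int)) : Decidable (Spec_sortTheArrayLen array out) := by unfold Spec_sortTheArrayLen; infer_instance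

-- ===== CLAIM (what is proved, stated in full; the proofs are below) =====
def Claim_equal_sortTheArrayLen : Prop := ∀ (array : List (List Int)), Dom_sortTheArrayLen array → Spec_sortTheArrayLen array (sortTheArrayLen array)

-- ===== LEMMAS AND PROOFS =====

-- strict descending order on (len, index) pairs, as a Prop
def pvGT (a b : Int × Int) : Prop := b.1 < a.1 ∨ (b.1 = a.1 ∧ b.2 < a.2)

-- pair key → the two-element list A builds
def pvToL (a : Int × Int) : List Int := [a.1, a.2]

theorem pv_two_lt (a b c d : Int) : ([a,b] < [c,d]) ↔ a < c ∨ (a = c ∧ b < d) := by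
  constructor
  · intro h
    cases h with
    | rel h => left; exact h
    | cons h =>
      cases h with
      | rel h => right; exact ⟨rfl, h⟩
      | cons h => cases h
  · rintro (h | ⟨rfl, h⟩)
    · exact List.Lex.rel h
    · exact List.Lex.cons (List.Lex.rel h)

theorem pvGt_iff (a b : Int × Int) : pvGt a b = true ↔ pvGT a b := by
  simp [pvGt, pvGT]; omega

theorem pvGT_of_not_gt {b k : Int × Int} (h : ¬ pvGt b k = true) (hne : b.2 ≠ k.2) : pvGT k b := by
  simp [pvGt] at h; simp [pvGT]; omega

theorem pvGT_trans {a b c : Int × Int} (h1 : pvGT a b) (h2 : pvGT b c) : pvGT a c := by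
  simp [pvGT] at *; omega

theorem pvIns_perm (k : Int × Int) (l : List (Int × Int)) : (pvIns k l).Perm (k :: l) := by
  induction l with
  | nil => simp [pvIns]
  | cons b rest ih =>
    simp only [pvIns]
    split
    · exact ((ih.cons b).trans (List.Perm.swap k b rest))
    · exact List.Perm.refl _

theorem pvIns_length (k : Int × Int) (l : List (Int × Int)) : (pvIns k l).length = l.length + 1 :=
  (pvIns_perm k l).length_eq

theorem pvIns_take (k : Int × Int) (l : List (Int × Int)) (n : Nat) :
    (pvIns k l).take n = (pvIns k (l.take n)).take n := by
  induction l generalizing n with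
  | nil => simp
  | cons b rest ih =>
    cases n with
    | zero => simp
    | succ m =>
      simp only [List.take_succ_cons, pvIns]
      split
      · simp only [List.take_succ_cons, List.cons.injEq, true_and]; exact ih m
      · cases m with
        | zero => simp
        | succ j => simp [List.take_take]

theorem pvIns_pairwise {k : Int × Int} {l : List (Int × Int)}
    (hp : l.Pairwise pvGT) (hne : ∀ x ∈ l, x.2 ≠ k.2) : (pvIns k l).Pairwise pvGT := by
  induction l with
  | nil => simp [pvIns]
  | cons b rest ih =>
    rcases List.pairwise_cons.mp hp with ⟨hb, hrest⟩
    simp only [pvIns]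
    split
    · rename_i hgt
      refine List.pairwise_cons.mpr ⟨?_, ih hrest (fun x hx => hne x (List.mem_cons_of_mem b hx))⟩
      intro x hx
      rcases List.mem_cons.mp ((List.Perm.mem_iff (pvIns_perm _ rest)).mp hx) with h | h
      · rw [h]; exact (pvGt_iff b k).mp hgt
      · exact hb x h
    · rename_i hngt
      have hkb : pvGT k b := pvGT_of_not_gt hngt (hne b (List.mem_cons_self))
      refine List.pairwise_cons.mpr ⟨?_, hp⟩
      intro x hx
      rcases List.mem_cons.mp hx with h | h
      · rw [h]; exact hkb
      · exact pvGT_trans hkb (hb x h)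

-- full single-key-at-a-time descending insertion over a key list
def pvFull (ks : List (Int × Int)) (f : List (Int × Int)) : List (Int × Int) :=
  ks.foldl (fun a k => pvIns k a) f

theorem pvFull_perm (ks : List (Int × Int)) (f : List (Int × Int)) :
    (pvFull ks f).Perm (ks ++ f) := by
  induction ks generalizing f with
  | nil => simp [pvFull]
  | cons k ks ih =>
    exact (ih (pvIns k f)).trans
      ((List.Perm.append_left ks (pvIns_perm k f)).trans List.perm_middle)

theorem pvFull_pairwise (ks : List (Int × Int)) (f : List (Int × Int))
    (hf : f.Pairwise pvGT)
    (hsep : ∀ x ∈ f, ∀ k ∈ ks, x.2 ≠ k.2)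
    (hks : ks.Pairwise (fun p q => p.2 ≠ q.2)) : (pvFull ks f).Pairwise pvGT := by
  induction ks generalizing f with
  | nil => exact hf
  | cons k ks ih =>
    rcases List.pairwise_cons.mp hks with ⟨hk, hks'⟩
    refine ih (pvIns k f) ?_ ?_ hks'
    · exact pvIns_pairwise hf (fun x hx => hsep x hx k List.mem_cons_self)
    · intro x hx k' hk'
      rcases List.mem_cons.mp ((List.Perm.mem_iff (pvIns_perm k f)).mp hx) with h | h
      · rw [h]; exact hk k' hk'
      · exact hsep x h k' (List.mem_cons_of_mem k hk')

-- B's truncated fold computes the first three of the full descending insertion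
theorem pvTop3 (ks : List (Int × Int)) (f : List (Int × Int)) :
    ks.foldl (fun best k =>
        let t := pvIns k best
        if t.length > 3 then t.dropLast else t) (f.take 3)
      = (pvFull ks f).take 3 := by
  induction ks generalizing f with
  | nil => simp [pvFull]
  | cons k ks ih =>
    have hstep : (let t := pvIns k (f.take 3); if t.length > 3 then t.dropLast else t)
        = (pvIns k f).take 3 := by
      rw [pvIns_take k f 3]
      set t := pvIns k (f.take 3) with ht
      have hlen : t.length = (f.take 3).length + 1 := pvIns_length _ _
      have hle : (f.take 3).length ≤ 3 := by simp
      by_cases h : t.length > 3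
      · have h4 : t.length = 4 := by omega
        simp only [h, if_pos]
        rw [List.dropLast_eq_take, h4]
      · simp only [h, if_neg, not_false_iff]
        rw [List.take_of_length_le (by omega)]
    simp only [List.foldl_cons, hstep]
    exact ih (pvIns k f)

theorem sortTheArrayLen_eq (array : List (List Int)) :
    sortTheArrayLen array = sortTheArrayLen_alt array := by
  unfold sortTheArrayLen sortTheArrayLen_alt
  dsimp only
  rw [PySem.List.foldl_append_singleton_eq_map, PySem.List.foldl_append_singleton_eq_map,
      List.nil_append, List.nil_append]
  -- abbreviations
  have hks2 : ((PySem.List.enumerate array).map (fun p => ((PySem.List.len p.2 : Int), p.1))).Pairwise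
      (fun p q : Int × Int => p.2 ≠ q.2) := by
    rw [List.pairwise_map]
    exact (PySem.List.pairwise_lt_enumerate array 0).imp (fun h => ne_of_lt h)
  set ks := (PySem.List.enumerate array).map (fun p => ((PySem.List.len p.2 : Int), p.1)) with hks
  have hmapToL : (PySem.List.enumerate array).map (fun p => [PySem.List.len p.2, p.1])
      = ks.map pvToL := by
    rw [hks, List.map_map]; rfl
  have hperm : ((pvFull ks []).map pvToL).Perm (ks.map pvToL) := by
    simpa using (pvFull_perm ks []).map pvToL
  have hfp : (pvFull ks []).Pairwise pvGT :=
    pvFull_pairwise ks [] (by simp) (by simp) hks2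
  have hpair : ((pvFull ks []).map pvToL).Pairwise (fun a b : List Int => b < a) := by
    rw [List.pairwise_map]
    refine hfp.imp ?_
    intro p q h
    exact (pv_two_lt q.1 q.2 p.1 p.2).mpr h
  have hsorted : PySem.List.sorted (ks.map pvToL) (fun x => x) true = (pvFull ks []).map pvToL := by
    have h := PySem.List.sorted_rev_eq_of_perm_of_pairwise_gt
      (ks.map pvToL) ((pvFull ks []).map pvToL) (fun x => x) hperm hpair
    convert h using 2
  have hslice : PySem.List.slice ((pvFull ks []).map pvToL) none (some 3)
      = ((pvFull ks []).map pvToL).take 3 := by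
    simpa using PySem.List.slice_to_natCast ((pvFull ks []).map pvToL) 3
  rw [hmapToL, hsorted, hslice]
  have hB : (PySem.List.enumerate array).foldl
      (fun best p =>
        let t := pvIns (PySem.List.len p.2, p.1) best
        if t.length > 3 then t.dropLast else t) []
      = (pvFull ks []).take 3 := by
    rw [← pvTop3 ks [], hks, List.foldl_map]
    rfl
  rw [hB, ← List.map_take, List.map_map]
  rfl

-- ===== VERDICT (by name: the statement is the Claim_ definition above) =====
theorem sortTheArrayLen_spec : Claim_equal_sortTheArrayLen := by
  intro array _
  exact sortTheArrayLen_eq array
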